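-- pv_equiv track=rewrite | github.com/Berkayaydinn/ise315-hw2-greedy-coin-change | change_maker.py | greedy_max_remainder
-- ===== SOURCE A (Python) =====
-- def score_remainder_quality(coin_set, remainder_amount):
--     # This helper is for Strategy 3.
--     # The idea: I want the remainder to be "friendly" for the next step.
--     # Homework says: remainder should be divisible by the largest possible denomination.
--     #
--     # So I compute:
--     #   best_divisor = max coin d in coin_set such that remainder_amount % d == 0
--     # If none divides it (except maybe 1), then score becomes small.
--     best_divisor = 0
--     for d in coin_set:
--         if d == 0:
--             continue
--         if remainder_amount % d == 0:
--             if d > best_divisor: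
--                 best_divisor = d
--     return best_divisor
--
-- def greedy_max_remainder(coin_set, target_value):
--     # Strategy 3:
--     # Try each coin choice, look at the remainder, and prefer leaving a remainder divisible
--     # by the largest denomination possible (so next step can use big coins cleanly).
--     remaining = target_value
--     picked = []
--
--     while remaining > 0:
--         best_coin = None
--         best_score = None
--         best_remainder = None
--
--         for c in coin_set:
--             if c <= remaining:
--                 rem_after = remaining - c
--                 quality = score_remainder_quality(coin_set, rem_after)
--
--                 # I want MAX quality (largest divisor that divides the remainder).
--                 # Tie-breaks (my own choice):
--                 # 1) If quality ties, prefer smaller remainder (feels like progress).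
--                 # 2) If still ties, prefer larger coin (fewer coins overall usually).
--                 if (best_score is None or
--                     quality > best_score or
--                     (quality == best_score and rem_after < best_remainder) or
--                     (quality == best_score and rem_after == best_remainder and c > best_coin)):
--                     best_score = quality
--                     best_coin = c
--                     best_remainder = rem_after
--
--         if best_coin is None:
--             return None
--
--         picked.append(best_coin)
--         remaining -= best_coin
--
--     return picked
-- ===== SOURCE B (Python) =====
-- def greedy_max_remainder(coin_set, target_value):
--     # Same greedy choice, computed without any quality scores: scan the distinct
--     # positive coins in DESCENDING order; the first divisor level that divides some
--     # candidate's remainder is the maximal achievable quality, and the largest such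
--     # candidate is exactly A's pick (A's tie-breaks reduce to "larger coin").
--     pos_desc = sorted({c for c in coin_set if c > 0}, reverse=True)
--     remaining = target_value
--     picked = []
--     while remaining > 0:
--         cands = [c for c in coin_set if c <= remaining]
--         if not cands:
--             return None
--         winner = None
--         for d in pos_desc:
--             best_c = None
--             for c in cands:
--                 if (remaining - c) % d == 0 and (best_c is None or c > best_c):
--                     best_c = c
--             if best_c is not None:
--                 winner = best_c
--                 break
--         if winner is None:
--             winner = max(cands)
--         picked.append(winner)
--         remaining -= winner
--     return picked
-- ===== Notes on version B (the rewrite author's own statement) =====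
-- stated objective: faster
-- what changed: B computes no quality scores at all: instead of A's inner rescan of the whole coin set to score every candidate at every step, B scans the distinct positive coins once in descending order and stops at the first divisor level that divides some candidate's remainder - that level is the maximal achievable quality and the largest candidate in it is exactly A's pick (A's tie-breaks reduce to 'larger coin').
import Mathlib
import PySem

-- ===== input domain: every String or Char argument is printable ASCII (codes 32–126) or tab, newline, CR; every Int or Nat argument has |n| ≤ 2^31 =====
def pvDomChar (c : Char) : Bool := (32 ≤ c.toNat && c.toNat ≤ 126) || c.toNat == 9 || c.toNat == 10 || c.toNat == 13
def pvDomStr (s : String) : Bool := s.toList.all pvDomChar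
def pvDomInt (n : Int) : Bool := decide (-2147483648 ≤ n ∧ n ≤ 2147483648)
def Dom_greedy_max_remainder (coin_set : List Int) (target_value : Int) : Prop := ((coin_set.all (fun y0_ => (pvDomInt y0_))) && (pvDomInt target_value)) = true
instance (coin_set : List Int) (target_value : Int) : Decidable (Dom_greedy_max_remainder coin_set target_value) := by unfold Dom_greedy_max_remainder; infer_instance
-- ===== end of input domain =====

-- B never computes quality scores: it scans the distinct positive coins in descending order and
-- stops at the first divisor level that divides some candidate's remainder (objective: faster).


-- ===== PORT A =====
def score_remainder_quality (coin_set : List Int) (remainder_amount : Int) : Int :=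
  coin_set.foldl (fun best_divisor d =>
    if d = 0 then best_divisor
    else if PySem.Int.mod remainder_amount d = 0 then
      (if d > best_divisor then d else best_divisor)
    else best_divisor) 0

-- the inner 'for c in coin_set' selection; state = (best_coin, best_score, best_remainder), none = all three None
def pvSelStepA (coin_set : List Int) (remaining : Int) (acc : Option (Int × Int × Int)) (c : Int) :
    Option (Int × Int × Int) :=
  if c ≤ remaining then
    let rem_after := remaining - c
    let quality := score_remainder_quality coin_set rem_after
    match acc with
    | none => some (c, quality, rem_after)
    | some (bc, bs, br) =>
      if quality > bs ∨ (quality = bs ∧ rem_after < br) ∨ (quality = bs ∧ rem_after = br ∧ c > bc) then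
        some (c, quality, rem_after)
      else some (bc, bs, br)
  else acc

def pvSelA (coin_set : List Int) (remaining : Int) : Option (Int × Int × Int) :=
  coin_set.foldl (pvSelStepA coin_set remaining) none

-- the 'while remaining > 0' loop, with fuel bounding the number of iterations: pvFuel generously
-- dominates the iteration count of every terminating run (remaining stays within target plus the
-- coin magnitudes); when the Python loop diverges (e.g. a zero coin picked forever) the port
-- returns none, and nothing is claimed there since the Python never returns a value.
def pvFuel (coin_set : List Int) (target_value : Int) : Nat :=
  target_value.toNat + 4 * (coin_set.foldl (fun acc c => acc + c.natAbs + 1) 0) + 4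

def pvGoA (coin_set : List Int) : Nat → Int → List Int → Option (List Int)
  | 0, remaining, picked => if remaining > 0 then none else some picked
  | Nat.succ f, remaining, picked =>
    if remaining > 0 then
      match pvSelA coin_set remaining with
      | none => none
      | some (best_coin, _, _) => pvGoA coin_set f (remaining - best_coin) (picked ++ [best_coin])
    else some picked

def greedy_max_remainder (coin_set : List Int) (target_value : Int) : Option (List Int) :=
  pvGoA coin_set (pvFuel coin_set target_value) target_value []

-- ===== PORT B =====
-- pos_desc = sorted({c for c in coin_set if c > 0}, reverse=True)
def pvPosDesc (coin_set : List Int) : List Int :=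
  PySem.List.sorted (PySem.Set.ofList (coin_set.filter (fun c => 0 < c))) (fun x => x) true

-- inner 'for c in cands' of one divisor level: largest candidate whose remainder d divides
def pvLevelStep (remaining d : Int) (best_c : Option Int) (c : Int) : Option Int :=
  if PySem.Int.mod (remaining - c) d = 0 then
    match best_c with
    | none => some c
    | some b => if c > b then some c else some b
  else best_c

def pvBestAtLevel (remaining d : Int) (cands : List Int) : Option Int :=
  cands.foldl (pvLevelStep remaining d) none

-- 'for d in pos_desc: ... if best_c is not None: winner = best_c; break'
def pvFindLevel (remaining : Int) (cands : List Int) : List Int → Option Int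
  | [] => none
  | d :: ds =>
    match pvBestAtLevel remaining d cands with
    | some bc => some bc
    | none => pvFindLevel remaining cands ds

-- the 'while remaining > 0' loop of B; same fuel convention as port A (see pvFuel above)
def pvGoB (coin_set pos_desc : List Int) : Nat → Int → List Int → Option (List Int)
  | 0, remaining, picked => if remaining > 0 then none else some picked
  | Nat.succ f, remaining, picked =>
    if remaining > 0 then
      let cands := coin_set.filter (fun c => c ≤ remaining)
      if cands = [] then none
      else
        match pvFindLevel remaining cands pos_desc with
        | some w => pvGoB coin_set pos_desc f (remaining - w) (picked ++ [w])
        | none =>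
          -- winner = max(cands); cands is nonempty here, so max? cannot be none
          match PySem.List.max? cands (fun x => x) with
          | some w => pvGoB coin_set pos_desc f (remaining - w) (picked ++ [w])
          | none => none
    else some picked

def greedy_max_remainder_alt (coin_set : List Int) (target_value : Int) : Option (List Int) :=
  pvGoB coin_set (pvPosDesc coin_set) (pvFuel coin_set target_value) target_value []

-- ===== PRECONDITION & SPEC =====
def Spec_greedy_max_remainder (coin_set : List Int) (target_value : Int) (out : Option (List Int)) : Prop := out = greedy_max_remainder_alt coin_set target_value
instance (coin_set : List Int) (target_value : Int) (out : Option (List Int)) : Decidable (Spec_greedy_max_remainder coin_set target_value out) := by unfold Spec_greedy_max_remainder; infer_instance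

-- ===== CLAIM (what is proved, stated in full; the proofs are below) =====
def Claim_equal_greedy_max_remainder : Prop := ∀ (coin_set : List Int) (target_value : Int), Dom_greedy_max_remainder coin_set target_value → Spec_greedy_max_remainder coin_set target_value (greedy_max_remainder coin_set target_value)

-- ===== LEMMAS AND PROOFS =====

-- step function of A's score fold (proof-side name; the port keeps its inline lambda)
def pvStepA (r b d : Int) : Int :=
  if d = 0 then b else if PySem.Int.mod r d = 0 then (if d > b then d else b) else b

lemma score_eq_foldl_pvStepA (cs : List Int) (r : Int) :
    score_remainder_quality cs r = cs.foldl (pvStepA r) 0 := rfl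

-- characterisation of A's score fold
lemma scoreA_spec (r : Int) (cs : List Int) (b : Int) (hb : 0 ≤ b) :
    b ≤ cs.foldl (pvStepA r) b ∧
    (cs.foldl (pvStepA r) b = b ∨ (cs.foldl (pvStepA r) b ∈ cs ∧ cs.foldl (pvStepA r) b ∣ r)) ∧
    (∀ d ∈ cs, d ∣ r → d ≤ cs.foldl (pvStepA r) b) := by
  induction cs generalizing b with
  | nil => exact ⟨le_rfl, Or.inl rfl, by simp⟩
  | cons d cs ih =>
    have hstep : (0 ≤ pvStepA r b d ∧ b ≤ pvStepA r b d) ∧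
        (pvStepA r b d = b ∨ (pvStepA r b d = d ∧ d ∣ r)) := by
      unfold pvStepA
      split_ifs with h1 h2 h3
      · exact ⟨⟨hb, le_rfl⟩, Or.inl rfl⟩
      · exact ⟨⟨by omega, by omega⟩, Or.inr ⟨rfl, (PySem.Int.mod_eq_zero_iff_dvd r d).1 h2⟩⟩
      · exact ⟨⟨hb, le_rfl⟩, Or.inl rfl⟩
      · exact ⟨⟨hb, le_rfl⟩, Or.inl rfl⟩
    have hdle : d ∣ r → d ≤ pvStepA r b d := by
      intro hdr
      by_cases h0 : d = 0
      · subst h0; unfold pvStepA; simp; omega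
      · have hm : PySem.Int.mod r d = 0 := (PySem.Int.mod_eq_zero_iff_dvd r d).2 hdr
        unfold pvStepA
        simp only [h0, if_false, hm, if_true]
        split_ifs <;> omega
    obtain ⟨h1, h2, h3⟩ := ih (pvStepA r b d) hstep.1.1
    rw [List.foldl_cons]
    refine ⟨le_trans hstep.1.2 h1, ?_, ?_⟩
    · rcases h2 with h | ⟨hmem, hdvd⟩
      · rcases hstep.2 with hbb | ⟨hbd, hdr⟩
        · exact Or.inl (h.trans hbb)
        · exact Or.inr ⟨by rw [h, hbd]; exact List.mem_cons_self .., by rw [h, hbd]; exact hdr⟩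
      · exact Or.inr ⟨List.mem_cons_of_mem _ hmem, hdvd⟩
    · intro e he hedvd
      rcases List.mem_cons.1 he with rfl | he'
      · exact le_trans (hdle hedvd) h1
      · exact h3 e he' hedvd

lemma score_spec0 (cs : List Int) (x : Int) :
    0 ≤ score_remainder_quality cs x ∧
    (score_remainder_quality cs x = 0 ∨
      (score_remainder_quality cs x ∈ cs ∧ score_remainder_quality cs x ∣ x)) ∧
    (∀ d ∈ cs, d ∣ x → d ≤ score_remainder_quality cs x) := by
  have h := scoreA_spec x cs 0 le_rfl
  rw [score_eq_foldl_pvStepA]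
  exact h

-- the lexicographic key order A maximises: (score of remainder, coin)
def pvKeyLe (cs : List Int) (remaining c w : Int) : Prop :=
  score_remainder_quality cs (remaining - c) < score_remainder_quality cs (remaining - w) ∨
  (score_remainder_quality cs (remaining - c) = score_remainder_quality cs (remaining - w) ∧ c ≤ w)

lemma pick_unique (cs : List Int) (rem : Int) (cands : List Int) (w1 w2 : Int)
    (h1 : w1 ∈ cands ∧ ∀ c ∈ cands, pvKeyLe cs rem c w1)
    (h2 : w2 ∈ cands ∧ ∀ c ∈ cands, pvKeyLe cs rem c w2) : w1 = w2 := by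
  have a := h1.2 w2 h2.1
  have b := h2.2 w1 h1.1
  unfold pvKeyLe at a b
  omega

-- ---- A's selection fold = argmax of the key over the candidate list ----

-- the unguarded body of A's selection step
def pvStepG (cs : List Int) (remaining : Int) (acc : Option (Int × Int × Int)) (c : Int) :
    Option (Int × Int × Int) :=
  let rem_after := remaining - c
  let quality := score_remainder_quality cs rem_after
  match acc with
  | none => some (c, quality, rem_after)
  | some (bc, bs, br) =>
    if quality > bs ∨ (quality = bs ∧ rem_after < br) ∨ (quality = bs ∧ rem_after = br ∧ c > bc) then
      some (c, quality, rem_after)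
    else some (bc, bs, br)

lemma stepA_eq_ite (cs : List Int) (remaining : Int) (acc : Option (Int × Int × Int)) (c : Int) :
    pvSelStepA cs remaining acc c =
      if decide (c ≤ remaining) = true then pvStepG cs remaining acc c else acc := by
  by_cases h : c ≤ remaining <;> simp [pvSelStepA, pvStepG, h]

lemma selA_eq_filter (cs : List Int) (remaining : Int) :
    pvSelA cs remaining =
      (cs.filter (fun c => c ≤ remaining)).foldl (pvStepG cs remaining) none := by
  unfold pvSelA
  rw [List.foldl_filter]
  congr 1
  funext acc c
  exact stepA_eq_ite cs remaining acc c

def pvPick (cs : List Int) (remaining b c : Int) : Int :=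
  if score_remainder_quality cs (remaining - c) > score_remainder_quality cs (remaining - b) ∨
     (score_remainder_quality cs (remaining - c) = score_remainder_quality cs (remaining - b) ∧
       c > b) then c else b

lemma foldG_some (cs : List Int) (remaining : Int) (l : List Int) (bc : Int) :
    l.foldl (pvStepG cs remaining)
        (some (bc, score_remainder_quality cs (remaining - bc), remaining - bc)) =
      some (l.foldl (pvPick cs remaining) bc,
        score_remainder_quality cs (remaining - l.foldl (pvPick cs remaining) bc),
        remaining - l.foldl (pvPick cs remaining) bc) := by
  induction l generalizing bc with
  | nil => rfl
  | cons c l ih =>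
    rw [List.foldl_cons, List.foldl_cons]
    have hstep : pvStepG cs remaining
        (some (bc, score_remainder_quality cs (remaining - bc), remaining - bc)) c =
        some (pvPick cs remaining bc c,
          score_remainder_quality cs (remaining - pvPick cs remaining bc c),
          remaining - pvPick cs remaining bc c) := by
      simp only [pvStepG, pvPick]
      split_ifs with h1 h2 <;> first | rfl | (exfalso; omega)
    rw [hstep, ih]

lemma pick_fold_spec (cs : List Int) (remaining : Int) (l : List Int) (b : Int) :
    (l.foldl (pvPick cs remaining) b = b ∨ l.foldl (pvPick cs remaining) b ∈ l) ∧
    pvKeyLe cs remaining b (l.foldl (pvPick cs remaining) b) ∧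
    (∀ c ∈ l, pvKeyLe cs remaining c (l.foldl (pvPick cs remaining) b)) := by
  induction l generalizing b with
  | nil =>
    exact ⟨Or.inl rfl, by simp only [List.foldl_nil]; unfold pvKeyLe; omega, by simp⟩
  | cons c l ih =>
    rw [List.foldl_cons]
    obtain ⟨h1, h2, h3⟩ := ih (pvPick cs remaining b c)
    have hp : pvPick cs remaining b c = b ∨ pvPick cs remaining b c = c := by
      unfold pvPick; split_ifs <;> simp
    have hb : pvKeyLe cs remaining b (pvPick cs remaining b c) ∧
        pvKeyLe cs remaining c (pvPick cs remaining b c) := by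
      unfold pvPick pvKeyLe; split_ifs <;> omega
    refine ⟨?_, ?_, ?_⟩
    · rcases h1 with h | h
      · rcases hp with hp | hp
        · exact Or.inl (h.trans hp)
        · exact Or.inr (by rw [h, hp]; exact List.mem_cons_self ..)
      · exact Or.inr (List.mem_cons_of_mem _ h)
    · have ha := hb.1; have hc := h2; unfold pvKeyLe at ha hc ⊢; omega
    · intro x hx
      rcases List.mem_cons.1 hx with rfl | hx'
      · have ha := hb.2; have hc := h2; unfold pvKeyLe at ha hc ⊢; omega
      · exact h3 x hx'

lemma selA_none (cs : List Int) (rem : Int)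
    (h : cs.filter (fun c => c ≤ rem) = []) : pvSelA cs rem = none := by
  rw [selA_eq_filter, h]; rfl

lemma selA_some (cs : List Int) (rem c0 : Int) (rest : List Int)
    (h : cs.filter (fun c => c ≤ rem) = c0 :: rest) :
    ∃ w, (w ∈ c0 :: rest ∧ ∀ c ∈ c0 :: rest, pvKeyLe cs rem c w) ∧
      pvSelA cs rem = some (w, score_remainder_quality cs (rem - w), rem - w) := by
  rw [selA_eq_filter, h, List.foldl_cons]
  rw [show pvStepG cs rem none c0 =
      some (c0, score_remainder_quality cs (rem - c0), rem - c0) from rfl]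
  rw [foldG_some cs rem rest c0]
  obtain ⟨h1, h2, h3⟩ := pick_fold_spec cs rem rest c0
  refine ⟨rest.foldl (pvPick cs rem) c0, ⟨?_, ?_⟩, rfl⟩
  · rcases h1 with h' | h'
    · rw [h']; exact List.mem_cons_self ..
    · exact List.mem_cons_of_mem _ h'
  · intro c hc
    rcases List.mem_cons.1 hc with rfl | hc'
    · exact h2
    · exact h3 c hc'

-- ---- B's level scan = argmax of the key over the candidate list ----

-- the unguarded body of a level step (running max)
def pvGmax (best_c : Option Int) (c : Int) : Option Int :=
  match best_c with
  | none => some c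
  | some b => if c > b then some c else some b

lemma levelstep_eq_ite (rem d : Int) (acc : Option Int) (c : Int) :
    pvLevelStep rem d acc c =
      if decide (PySem.Int.mod (rem - c) d = 0) = true then pvGmax acc c else acc := by
  by_cases h : PySem.Int.mod (rem - c) d = 0 <;> simp [pvLevelStep, pvGmax, h]

lemma bestAtLevel_eq_filter (rem d : Int) (cands : List Int) :
    pvBestAtLevel rem d cands =
      (cands.filter (fun c => decide (PySem.Int.mod (rem - c) d = 0))).foldl pvGmax none := by
  unfold pvBestAtLevel
  rw [List.foldl_filter]
  congr 1
  funext acc c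
  exact levelstep_eq_ite rem d acc c

lemma gmax_fold (l : List Int) (a : Int) :
    ∃ w, l.foldl pvGmax (some a) = some w ∧ (w = a ∨ w ∈ l) ∧ a ≤ w ∧ ∀ c ∈ l, c ≤ w := by
  induction l generalizing a with
  | nil => exact ⟨a, rfl, Or.inl rfl, le_rfl, by simp⟩
  | cons c l ih =>
    rw [List.foldl_cons]
    have hg : pvGmax (some a) c = some (if c > a then c else a) := by
      show (if c > a then some c else some a) = some (if c > a then c else a)
      split_ifs <;> rfl
    rw [hg]
    obtain ⟨w, hw, hmem, hle, hall⟩ := ih (if c > a then c else a)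
    refine ⟨w, hw, ?_, ?_, ?_⟩
    · rcases hmem with h | h
      · by_cases hca : c > a
        · rw [if_pos hca] at h; exact Or.inr (by rw [h]; exact List.mem_cons_self ..)
        · rw [if_neg hca] at h; exact Or.inl h
      · exact Or.inr (List.mem_cons_of_mem _ h)
    · have : a ≤ (if c > a then c else a) := by split_ifs <;> omega
      omega
    · intro x hx
      rcases List.mem_cons.1 hx with rfl | hx'
      · have : x ≤ (if x > a then x else a) := by split_ifs <;> omega
        omega
      · exact hall x hx'

lemma bestAtLevel_none_spec (rem d : Int) (cands : List Int)
    (h : pvBestAtLevel rem d cands = none) : ∀ c ∈ cands, ¬ d ∣ (rem - c) := by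
  intro c hc hdvd
  rw [bestAtLevel_eq_filter] at h
  have hcf : c ∈ cands.filter (fun c => decide (PySem.Int.mod (rem - c) d = 0)) := by
    rw [List.mem_filter]
    exact ⟨hc, by simpa [PySem.Int.mod_eq_zero_iff_dvd] using hdvd⟩
  rcases hfl : cands.filter (fun c => decide (PySem.Int.mod (rem - c) d = 0)) with _ | ⟨x, xs⟩
  · rw [hfl] at hcf; simp at hcf
  · rw [hfl, List.foldl_cons] at h
    rw [show pvGmax none x = some x from rfl] at h
    obtain ⟨w, hw, -⟩ := gmax_fold xs x
    rw [hw] at h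
    simp at h

lemma bestAtLevel_some_spec (rem d : Int) (cands : List Int) (b : Int)
    (h : pvBestAtLevel rem d cands = some b) :
    b ∈ cands ∧ d ∣ (rem - b) ∧ ∀ c ∈ cands, d ∣ (rem - c) → c ≤ b := by
  rw [bestAtLevel_eq_filter] at h
  rcases hfl : cands.filter (fun c => decide (PySem.Int.mod (rem - c) d = 0)) with _ | ⟨x, xs⟩
  · rw [hfl] at h; simp at h
  · rw [hfl, List.foldl_cons] at h
    rw [show pvGmax none x = some x from rfl] at h
    obtain ⟨w, hw, hmem, hle, hall⟩ := gmax_fold xs x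
    rw [hw] at h
    have hwb : b = w := by simpa using h.symm
    subst hwb
    have hbf : b ∈ cands.filter (fun c => decide (PySem.Int.mod (rem - c) d = 0)) := by
      rw [hfl]
      rcases hmem with h' | h'
      · rw [h']; exact List.mem_cons_self ..
      · exact List.mem_cons_of_mem _ h'
    have hbp := List.mem_filter.1 hbf
    refine ⟨hbp.1, by simpa [PySem.Int.mod_eq_zero_iff_dvd] using hbp.2, ?_⟩
    intro c hc hdvd
    have hcf : c ∈ cands.filter (fun c => decide (PySem.Int.mod (rem - c) d = 0)) := by
      rw [List.mem_filter]
      exact ⟨hc, by simpa [PySem.Int.mod_eq_zero_iff_dvd] using hdvd⟩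
    rw [hfl] at hcf
    rcases List.mem_cons.1 hcf with rfl | hc'
    · exact hle
    · exact hall c hc'

lemma findLevel_none_spec (rem : Int) (cands : List Int) :
    ∀ L, pvFindLevel rem cands L = none → ∀ d ∈ L, ∀ c ∈ cands, ¬ d ∣ (rem - c) := by
  intro L
  induction L with
  | nil => intro _ d hd; simp at hd
  | cons d0 L ih =>
    intro h e he c hc
    rcases hb : pvBestAtLevel rem d0 cands with _ | b
    · simp only [pvFindLevel, hb] at h
      rcases List.mem_cons.1 he with rfl | he'
      · exact bestAtLevel_none_spec rem e cands hb c hc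
      · exact ih h e he' c hc
    · simp only [pvFindLevel, hb] at h
      simp at h

lemma findLevel_some_spec (rem : Int) (cands : List Int) :
    ∀ L, L.Pairwise (· > ·) → ∀ w, pvFindLevel rem cands L = some w →
      ∃ d, d ∈ L ∧ d ∣ (rem - w) ∧ w ∈ cands ∧ (∀ c ∈ cands, d ∣ (rem - c) → c ≤ w) ∧
        (∀ e ∈ L, (∃ c ∈ cands, e ∣ (rem - c)) → e ≤ d) := by
  intro L
  induction L with
  | nil => intro _ w h; simp [pvFindLevel] at h
  | cons d0 L ih =>
    intro hp w h
    rcases hb : pvBestAtLevel rem d0 cands with _ | b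
    · simp only [pvFindLevel, hb] at h
      obtain ⟨d, hdL, hdvd, hwmem, hmax, htop⟩ := ih (List.pairwise_cons.1 hp).2 w h
      refine ⟨d, List.mem_cons_of_mem _ hdL, hdvd, hwmem, hmax, ?_⟩
      intro e he hex
      rcases List.mem_cons.1 he with rfl | he'
      · obtain ⟨c, hc, hcd⟩ := hex
        exact absurd hcd (bestAtLevel_none_spec rem e cands hb c hc)
      · exact htop e he' hex
    · simp only [pvFindLevel, hb] at h
      obtain rfl : b = w := by simpa using h
      obtain ⟨hmem, hdvd, hmax⟩ := bestAtLevel_some_spec rem d0 cands b hb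
      refine ⟨d0, List.mem_cons_self .., hdvd, hmem, hmax, ?_⟩
      intro e he _
      rcases List.mem_cons.1 he with rfl | he'
      · exact le_rfl
      · exact le_of_lt ((List.pairwise_cons.1 hp).1 e he')

-- ---- the sorted distinct positive coin list ----

lemma posdesc_mem (cs : List Int) (d : Int) : d ∈ pvPosDesc cs ↔ (d ∈ cs ∧ 0 < d) := by
  unfold pvPosDesc
  rw [PySem.List.mem_sorted, PySem.Set.mem_ofList, List.mem_filter]
  simp

lemma posdesc_sorted (cs : List Int) : (pvPosDesc cs).Pairwise (· > ·) := by
  have h1 := PySem.List.sorted_pairwise_rev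
    (PySem.Set.ofList (cs.filter (fun c => 0 < c))) (fun x => x)
  have h2 : (pvPosDesc cs).Nodup := by
    unfold pvPosDesc
    exact (PySem.List.sorted_perm _ _ _).nodup_iff.2 (PySem.Set.nodup_ofList _)
  unfold pvPosDesc at h2 ⊢
  exact (h1.and h2).imp (fun h => by omega)

-- ---- B's winner satisfies the same argmax property as A's pick ----

lemma winner_level_isPick (cs : List Int) (remaining : Int) (cands : List Int) (w : Int)
    (hw : pvFindLevel remaining cands (pvPosDesc cs) = some w) :
    w ∈ cands ∧ ∀ c ∈ cands, pvKeyLe cs remaining c w := by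
  obtain ⟨d, hdL, hdvd, hwmem, hmax, htop⟩ :=
    findLevel_some_spec remaining cands (pvPosDesc cs) (posdesc_sorted cs) w hw
  obtain ⟨hdcs, hdpos⟩ := (posdesc_mem cs d).1 hdL
  have hqw : score_remainder_quality cs (remaining - w) = d := by
    have hge : d ≤ score_remainder_quality cs (remaining - w) :=
      (score_spec0 cs (remaining - w)).2.2 d hdcs hdvd
    have hle : score_remainder_quality cs (remaining - w) ≤ d := by
      rcases (score_spec0 cs (remaining - w)).2.1 with h0 | ⟨hqcs, hqdvd⟩
      · omega
      · have hqpos : 0 < score_remainder_quality cs (remaining - w) := by omega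
        exact htop _ ((posdesc_mem cs _).2 ⟨hqcs, hqpos⟩) ⟨w, hwmem, hqdvd⟩
    omega
  refine ⟨hwmem, ?_⟩
  intro c hc
  have hqcle : score_remainder_quality cs (remaining - c) ≤ d := by
    rcases (score_spec0 cs (remaining - c)).2.1 with h0 | ⟨hqcs, hqdvd⟩
    · omega
    · by_cases hqpos : 0 < score_remainder_quality cs (remaining - c)
      · exact htop _ ((posdesc_mem cs _).2 ⟨hqcs, hqpos⟩) ⟨c, hc, hqdvd⟩
      · have := (score_spec0 cs (remaining - c)).1; omega
  by_cases heq : score_remainder_quality cs (remaining - c) = d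
  · right
    refine ⟨by omega, ?_⟩
    rcases (score_spec0 cs (remaining - c)).2.1 with h0 | ⟨-, hqdvd⟩
    · omega
    · exact hmax c hc (by rwa [heq] at hqdvd)
  · left; omega

lemma winner_max_isPick (cs : List Int) (remaining : Int) (cands : List Int)
    (hnone : pvFindLevel remaining cands (pvPosDesc cs) = none) (w : Int)
    (hw : PySem.List.max? cands (fun x => x) = some w) :
    w ∈ cands ∧ ∀ c ∈ cands, pvKeyLe cs remaining c w := by
  have hall0 : ∀ c ∈ cands, score_remainder_quality cs (remaining - c) = 0 := by
    intro c hc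
    rcases (score_spec0 cs (remaining - c)).2.1 with h0 | ⟨hqcs, hqdvd⟩
    · exact h0
    · by_cases hqpos : 0 < score_remainder_quality cs (remaining - c)
      · exact absurd hqdvd
          (findLevel_none_spec remaining cands (pvPosDesc cs) hnone _
            ((posdesc_mem cs _).2 ⟨hqcs, hqpos⟩) c hc)
      · have := (score_spec0 cs (remaining - c)).1; omega
  have hwmem := PySem.List.max?_mem hw
  refine ⟨hwmem, fun c hc => Or.inr ⟨?_, PySem.List.max?_isMax hw c hc⟩⟩
  rw [hall0 c hc, hall0 w hwmem]

-- ---- the two loops agree ----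

lemma go_eq (cs : List Int) :
    ∀ (fuel : Nat) (remaining : Int) (picked : List Int),
      pvGoA cs fuel remaining picked = pvGoB cs (pvPosDesc cs) fuel remaining picked := by
  intro fuel
  induction fuel with
  | zero => intro r p; rfl
  | succ f ih =>
    intro r p
    by_cases hr : r > 0
    · rcases hfe : cs.filter (fun c => c ≤ r) with _ | ⟨c0, rest⟩
      · have hA := selA_none cs r hfe
        simp [pvGoA, pvGoB, if_pos hr, hA, hfe]
      · obtain ⟨w, hwPick, hA⟩ := selA_some cs r c0 rest hfe
        rcases hfl : pvFindLevel r (c0 :: rest) (pvPosDesc cs) with _ | wB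
        · rcases hmx : PySem.List.max? (c0 :: rest) (fun x => x) with _ | wB
          · exact absurd hmx (by simp [PySem.List.max?_eq_none_iff])
          · have hwB := winner_max_isPick cs r (c0 :: rest) hfl wB hmx
            have heq : wB = w := pick_unique cs r (c0 :: rest) wB w hwB hwPick
            simp only [pvGoA, pvGoB, if_pos hr, hA, hfe, hfl, hmx]
            rw [heq]
            simp only [reduceCtorEq]
            exact ih (r - w) (p ++ [w])
        · have hwB := winner_level_isPick cs r (c0 :: rest) wB hfl
          have heq : wB = w := pick_unique cs r (c0 :: rest) wB w hwB hwPick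
          simp only [pvGoA, pvGoB, if_pos hr, hA, hfe, hfl]
          rw [heq]
          simp only [reduceCtorEq]
          exact ih (r - w) (p ++ [w])
    · simp [pvGoA, pvGoB, hr]

-- ===== VERDICT (by name: the statement is the Claim_ definition above) =====
theorem greedy_max_remainder_spec : Claim_equal_greedy_max_remainder := by
  intro cs t _dom
  unfold Spec_greedy_max_remainder greedy_max_remainder greedy_max_remainder_alt
  exact go_eq cs (pvFuel cs t) t []
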